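-- pv_equiv track=rewrite | github.com/mehrain/exercises | bootdev/functional_programming/no-op/main.py | markdown_to_text
-- ===== SOURCE A (Python) =====
-- def markdown_to_text(doc_content):
--     split_document = doc_content.split("\n")
--     new_document = []
--     for line in split_document:
--         if line.startswith("#"):
--             line = line.lstrip("#")
--         new_document.append(line)
--     joined_string = "\n".join(new_document)
--     return astrix_remover(joined_string)
--
-- def astrix_remover(doc_content):
--     split_document = doc_content.split("\n")
--     new_document = []
--     for line in split_document:
--         split_line = line.split()
--         new_line = []
--         for word in split_line:
--             new_line.append(word.strip("*"))
--         new_document.append(" ".join(new_line))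
--     return "\n".join(new_document)
-- ===== SOURCE B (Python) =====
-- def markdown_to_text(doc_content):
--     return "\n".join(
--         " ".join(word.strip("*") for word in line.lstrip("#").split())
--         for line in doc_content.split("\n")
--     )
-- ===== Notes on version B (the rewrite author's own statement) =====
-- stated objective: simpler
-- what changed: Single comprehension pass per line (lstrip '#' unconditionally, which is a no-op on lines not starting with '#', then strip '*' per word) instead of two sequential passes with an intermediate full-string join/re-split and a separate astrix_remover helper.
import Mathlib
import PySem

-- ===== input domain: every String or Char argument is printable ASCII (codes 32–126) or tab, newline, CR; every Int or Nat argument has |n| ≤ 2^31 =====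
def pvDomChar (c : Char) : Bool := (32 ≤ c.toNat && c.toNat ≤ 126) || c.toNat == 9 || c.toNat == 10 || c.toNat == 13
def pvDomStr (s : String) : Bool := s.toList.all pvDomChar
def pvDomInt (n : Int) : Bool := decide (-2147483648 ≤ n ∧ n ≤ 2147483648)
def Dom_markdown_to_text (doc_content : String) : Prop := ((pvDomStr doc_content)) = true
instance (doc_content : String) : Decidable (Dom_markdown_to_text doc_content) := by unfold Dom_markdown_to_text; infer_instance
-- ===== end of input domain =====

-- B collapses A's two sequential passes (header strip, then join/re-split and per-word '*' strip) into one pass per line; objective: simpler.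


-- ===== PORT A =====
-- helper astrix_remover, as in A.  line.lstrip("#") is ported as dropWhile (· == '#')
-- (exact: lstrip with a one-character set drops exactly the leading run of that character).
def astrix_remover (doc_content : String) : String :=
  let split_document := PySem.Chars.splitOn doc_content.toList ['\n']
  let new_document := split_document.foldl (fun nd line =>
    let split_line := PySem.Chars.split₀ line
    let new_line := split_line.foldl (fun nl word => nl ++ [PySem.Chars.stripChars word ['*']]) []
    nd ++ [PySem.Chars.join [' '] new_line]) []
  String.ofList (PySem.Chars.join ['\n'] new_document)

def markdown_to_text (doc_content : String) : String :=
  let split_document := PySem.Chars.splitOn doc_content.toList ['\n']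
  let new_document := split_document.foldl (fun nd line =>
    nd ++ [if PySem.Chars.startswith line ['#'] then line.dropWhile (· == '#') else line]) []
  let joined_string := PySem.Chars.join ['\n'] new_document
  astrix_remover (String.ofList joined_string)

-- ===== PORT B =====
def markdown_to_text_alt (doc_content : String) : String :=
  String.ofList (PySem.Chars.join ['\n']
    ((PySem.Chars.splitOn doc_content.toList ['\n']).map (fun line =>
      PySem.Chars.join [' ']
        ((PySem.Chars.split₀ (line.dropWhile (· == '#'))).map
          (fun word => PySem.Chars.stripChars word ['*'])))))

-- ===== PRECONDITION & SPEC =====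
def Spec_markdown_to_text (doc_content : String) (out : String) : Prop := out = markdown_to_text_alt doc_content
instance (doc_content : String) (out : String) : Decidable (Spec_markdown_to_text doc_content out) := by unfold Spec_markdown_to_text; infer_instance

-- ===== CLAIM (what is proved, stated in full; the proofs are below) =====
def Claim_equal_markdown_to_text : Prop := ∀ (doc_content : String), Dom_markdown_to_text doc_content → Spec_markdown_to_text doc_content (markdown_to_text doc_content)

-- ===== LEMMAS AND PROOFS =====

-- an append-accumulating foldl is a map
theorem foldl_append_map {α β : Type} (f : α → β) (l : List α) (acc : List β) :
    l.foldl (fun a x => a ++ [f x]) acc = acc ++ l.map f := by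
  induction l generalizing acc with
  | nil => simp
  | cons x xs ih => simp [List.foldl, ih]

-- a run of splitOn.go over a sep-free chunk
theorem go_clean (c : Char) (l cur : List Char) (acc : List (List Char)) (fuel : Nat)
    (hf : l.length < fuel) (hc : c ∉ l) :
    PySem.Chars.splitOn.go [c] fuel l cur acc = ((cur.reverse ++ l) :: acc).reverse := by
  induction l generalizing cur fuel with
  | nil =>
    cases fuel with
    | zero => omega
    | succ n => simp [PySem.Chars.splitOn.go]
  | cons x xs ih =>
    cases fuel with
    | zero => omega
    | succ n =>
      have hx : x ≠ c := fun h => hc (h ▸ List.mem_cons_self)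
      have hpre : [c].isPrefixOf (x :: xs) = false := by
        simp [List.isPrefixOf]; exact fun h => absurd h.symm hx
      rw [PySem.Chars.splitOn.go, hpre]
      simp only [Bool.false_eq_true, if_false]
      rw [ih (x :: cur) n (by simpa using Nat.lt_of_succ_lt_succ hf)
        (fun h => hc (List.mem_cons_of_mem _ h))]
      simp

theorem go_nil_eval (c : Char) (n : Nat) (cur : List Char) (acc : List (List Char)) :
    PySem.Chars.splitOn.go [c] (n+1) [] cur acc = (cur.reverse :: acc).reverse := by
  simp [PySem.Chars.splitOn.go]

-- consuming one sep-free part up to the next separator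
theorem go_step (c : Char) (y t cur : List Char) (acc : List (List Char)) (fuel : Nat)
    (hf : y.length < fuel) (hc : c ∉ y) :
    PySem.Chars.splitOn.go [c] fuel (y ++ c :: t) cur acc
      = PySem.Chars.splitOn.go [c] (fuel - (y.length + 1)) t [] ((cur.reverse ++ y) :: acc) := by
  induction y generalizing cur fuel with
  | nil =>
    cases fuel with
    | zero => omega
    | succ n =>
      simp only [List.nil_append]
      rw [PySem.Chars.splitOn.go]
      have hpre : [c].isPrefixOf (c :: t) = true := by simp [List.isPrefixOf]
      rw [if_pos hpre]
      simp
  | cons x y' ih =>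
    cases fuel with
    | zero => omega
    | succ n =>
      have hx : x ≠ c := fun h => hc (h ▸ List.mem_cons_self)
      have hpre : [c].isPrefixOf (x :: (y' ++ c :: t)) = false := by
        simp [List.isPrefixOf]; exact fun h => absurd h.symm hx
      rw [show (x :: y') ++ c :: t = x :: (y' ++ c :: t) from rfl,
        PySem.Chars.splitOn.go, hpre]
      simp only [Bool.false_eq_true, if_false]
      rw [ih (x :: cur) n (by simpa using hf) (fun h => hc (List.mem_cons_of_mem _ h))]
      have : n - (y'.length + 1) = n + 1 - ((x :: y').length + 1) := by simp
      rw [this]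
      simp

-- splitOn.go over a join of sep-free parts recovers the parts
theorem go_join (c : Char) (ys : List (List Char)) (hys : ys ≠ [])
    (hc : ∀ y ∈ ys, c ∉ y) (acc : List (List Char)) (fuel : Nat)
    (hf : (PySem.Chars.join [c] ys).length < fuel) :
    PySem.Chars.splitOn.go [c] fuel (PySem.Chars.join [c] ys) [] acc
      = acc.reverse ++ ys := by
  induction ys generalizing acc fuel with
  | nil => exact absurd rfl hys
  | cons y ys ih =>
    cases ys with
    | nil =>
      rw [PySem.Chars.join_singleton] at hf ⊢
      rw [go_clean c y [] acc fuel hf (hc y List.mem_cons_self)]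
      simp
    | cons y2 ys' =>
      rw [PySem.Chars.join_cons_cons] at hf ⊢
      have hjoin : y ++ [c] ++ PySem.Chars.join [c] (y2 :: ys') = y ++ c :: PySem.Chars.join [c] (y2 :: ys') := by simp
      rw [hjoin]
      rw [go_step c y _ [] acc fuel (by simp only [List.length_append, List.length_cons] at hf; omega) (hc y List.mem_cons_self)]
      simp only [List.reverse_nil, List.nil_append]
      rw [ih (by simp) (fun z hz => hc z (List.mem_cons_of_mem _ hz)) (y :: acc)
        (fuel - (y.length + 1)) (by simp only [List.length_append, List.length_cons] at hf; omega)]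
      simp

-- splitOn of a join of sep-free nonempty parts list is the identity
theorem splitOn_join (c : Char) (ys : List (List Char)) (hys : ys ≠ [])
    (hc : ∀ y ∈ ys, c ∉ y) :
    PySem.Chars.splitOn (PySem.Chars.join [c] ys) [c] = ys := by
  unfold PySem.Chars.splitOn
  rw [go_join c ys hys hc [] _ (Nat.lt_succ_self _)]
  simp

-- pieces of a single-character splitOn are nonempty and sep-free
theorem go_ne_nil (c : Char) (fuel : Nat) (l cur : List Char) (acc : List (List Char)) :
    PySem.Chars.splitOn.go [c] fuel l cur acc ≠ [] := by
  induction fuel generalizing l cur acc with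
  | zero => simp [PySem.Chars.splitOn.go]
  | succ n ih =>
    cases l with
    | nil => simp [PySem.Chars.splitOn.go]
    | cons x xs =>
      rw [PySem.Chars.splitOn.go]
      split
      · exact ih _ _ _
      · exact ih _ _ _

theorem go_pieces (c : Char) (fuel : Nat) (l cur : List Char) (acc : List (List Char))
    (hf : l.length < fuel)
    (hcur : c ∉ cur) (hacc : ∀ p ∈ acc, c ∉ p) :
    ∀ p ∈ PySem.Chars.splitOn.go [c] fuel l cur acc, c ∉ p := by
  induction fuel generalizing l cur acc with
  | zero => omega
  | succ n ih =>
    cases l with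
    | nil =>
      intro p hp
      rw [go_nil_eval] at hp
      simp only [List.mem_reverse, List.mem_cons] at hp
      rcases hp with rfl | hp
      · simpa using hcur
      · exact hacc p hp
    | cons x xs =>
      rw [PySem.Chars.splitOn.go]
      by_cases hpre : [c].isPrefixOf (x :: xs) = true
      · rw [if_pos hpre]
        simp only [List.length_cons, List.length_nil, List.drop_succ_cons, List.drop_zero]
        apply ih
        · simp only [List.length_cons] at hf; omega
        · simp
        · intro p hp
          rcases List.mem_cons.mp hp with rfl | hp
          · simpa using hcur
          · exact hacc p hp
      · rw [if_neg hpre]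
        have hx : x ≠ c := by
          intro h; subst h; simp [List.isPrefixOf] at hpre
        apply ih
        · simp only [List.length_cons] at hf ⊢; omega
        · intro h
          rcases List.mem_cons.mp h with h | h
          · exact hx h.symm
          · exact hcur h
        · exact hacc

theorem splitOn_ne_nil (c : Char) (s : List Char) :
    PySem.Chars.splitOn s [c] ≠ [] := go_ne_nil c _ s [] []

theorem splitOn_pieces (c : Char) (s : List Char) :
    ∀ p ∈ PySem.Chars.splitOn s [c], c ∉ p :=
  go_pieces c _ s [] [] (Nat.lt_succ_self _) (by simp) (by simp)

-- the header-strip step: the guard is redundant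
theorem lstrip_guard (line : List Char) :
    (if PySem.Chars.startswith line ['#'] then line.dropWhile (· == '#') else line)
      = line.dropWhile (· == '#') := by
  cases line with
  | nil => simp [PySem.Chars.startswith, List.isPrefixOf]
  | cons x xs =>
    by_cases h : x = '#'
    · subst h; simp [PySem.Chars.startswith, List.isPrefixOf]
    · have hb : (x == '#') = false := by simp [h]
      simp [PySem.Chars.startswith, List.isPrefixOf, List.dropWhile, hb]

-- ===== VERDICT (by name: the statement is the Claim_ definition above) =====
theorem markdown_to_text_spec : Claim_equal_markdown_to_text := by
  intro doc _
  unfold Spec_markdown_to_text markdown_to_text markdown_to_text_alt astrix_remover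
  simp only [foldl_append_map, List.nil_append]
  have hpieces := splitOn_pieces '\n' doc.toList
  have hne := splitOn_ne_nil '\n' doc.toList
  rw [String.toList_ofList]
  rw [splitOn_join '\n' _ (by simpa using hne)
    (by
      intro y hy
      simp only [List.mem_map] at hy
      obtain ⟨line, hl, rfl⟩ := hy
      rw [lstrip_guard]
      exact fun hmem => hpieces line hl ((List.dropWhile_sublist _).subset hmem))]
  rw [List.map_map]
  congr 2
  apply List.map_congr_left
  intro line _
  simp only [Function.comp]
  rw [lstrip_guard]
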